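-- pv_equiv track=rewrite | github.com/Flamingo3003/Artificial-Intelligence | 8Queens_23110090.py | partial_observation_8_queens_steps
-- ===== SOURCE A (Python) =====
-- N = 8
--
-- def is_safe(state, row, col):
--     for r, c in enumerate(state):
--         if c == col or abs(c - col) == abs(r - row):
--             return False
--     return True
--
-- def partial_observation_8_queens_steps(partial_state):
--     steps = []
--     solution = partial_state[:]
--
--     def solve(row):
--         if row == N:
--             steps.append(solution[:])
--             return True
--         if row < len(partial_state):
--             # Đã biết trước quân hậu ở hàng này
--             steps.append(solution[:])
--             return solve(row + 1)
--         for col in range(N):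
--             if is_safe(solution, row, col):
--                 solution.append(col)
--                 steps.append(solution[:])
--                 if solve(row + 1):
--                     return True
--                 solution.pop()
--         return False
--
--     solve(len(solution))
--     return steps
-- ===== SOURCE B (Python) =====
-- N = 8
--
-- def is_safe(state, row, col):
--     for r, c in enumerate(state):
--         if c == col or abs(c - col) == abs(r - row):
--             return False
--     return True
--
-- def partial_observation_8_queens_steps(partial_state):
--     # Iterative DFS with an explicit stack of next-column counters.
--     sol = list(partial_state)
--     if len(sol) == N:
--         return [sol[:]]
--     steps = []
--     stack = [0]  # stack[i] = next column to examine at depth i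
--     while stack:
--         col = stack[-1]
--         if col == N:
--             # this depth is exhausted: backtrack
--             stack.pop()
--             if stack:
--                 sol.pop()
--                 stack[-1] += 1
--             continue
--         if is_safe(sol, len(sol), col):
--             sol.append(col)
--             steps.append(sol[:])
--             if len(sol) == N:
--                 steps.append(sol[:])  # the recorded complete solution
--                 break
--             stack.append(0)
--         else:
--             stack[-1] += 1
--     return steps
-- ===== Notes on version B (the rewrite author's own statement) =====
-- stated objective: alternative
-- what changed: A's recursive backtracking solve() is replaced by an iterative DFS driven by an explicit stack of per-depth next-column counters, producing the identical steps trace; the top-level preset check (len==N) replaces A's dead preset-row branch.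
import Mathlib
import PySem

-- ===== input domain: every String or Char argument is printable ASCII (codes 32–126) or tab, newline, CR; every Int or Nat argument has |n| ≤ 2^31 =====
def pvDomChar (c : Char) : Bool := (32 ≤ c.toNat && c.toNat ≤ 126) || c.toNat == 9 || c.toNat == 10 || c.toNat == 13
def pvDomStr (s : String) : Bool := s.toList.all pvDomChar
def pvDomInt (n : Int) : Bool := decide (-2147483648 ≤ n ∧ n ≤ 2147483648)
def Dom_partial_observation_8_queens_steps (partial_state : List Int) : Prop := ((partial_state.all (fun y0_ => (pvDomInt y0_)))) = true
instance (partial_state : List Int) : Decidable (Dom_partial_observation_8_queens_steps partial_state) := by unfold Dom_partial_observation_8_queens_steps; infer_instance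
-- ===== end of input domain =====

-- B replaces A's recursive backtracking `solve` by an iterative DFS over an explicit
-- stack of next-column counters, producing the identical `steps` trace (objective: alternative).
-- Both ports carry a fuel counter solely as a totality guard (one unit per column-examination
-- event, identically on both sides); with fuel 1000000 it is never exhausted on real runs.

-- ===== PORT A =====
-- is_safe(state, row, col): shared helper, defined identically in A and in Source B
def isSafeAux : List Int → Int → Int → Int → Bool
  | [], _, _, _ => true
  | c :: rest, r, row, col =>
    if c == col || (c - col).natAbs == (r - row).natAbs then false
    else isSafeAux rest (r + 1) row col

def isSafe (state : List Int) (row col : Int) : Bool := isSafeAux state 0 row col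

-- solve(row) of A; the result status is `none` on fuel exhaustion (never reached with the
-- fuel used below), `some b` for Python's return value b; it also carries the remaining
-- fuel (bounded by the subtype, needed for termination) and the `steps` list.
mutual
def solveA (pLen : Nat) (fuel : Nat) (row : Int) (sol : List Int) (steps : List (List Int)) :
    {r : Option Bool × Nat × List (List Int) // r.2.1 ≤ fuel} :=
  if row == 8 then ⟨(some true, fuel, steps ++ [sol]), le_refl _⟩
  else if row < (pLen : Int) then
    solveA pLen fuel (row + 1) sol (steps ++ [sol])
  else
    tryA pLen fuel row 0 sol steps
termination_by (fuel, 1, ((pLen : Int) - row).toNat)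
decreasing_by
  · apply Prod.Lex.right; apply Prod.Lex.right; omega
  · apply Prod.Lex.right; apply Prod.Lex.left; omega

-- the `for col in range(N)` loop of solve, from column c on
def tryA (pLen : Nat) (fuel : Nat) (row : Int) (c : Int) (sol : List Int) (steps : List (List Int)) :
    {r : Option Bool × Nat × List (List Int) // r.2.1 ≤ fuel} :=
  match fuel with
  | 0 => ⟨(none, 0, steps), le_refl _⟩
  | g + 1 =>
    if c < 8 then
      if isSafe sol row c then
        let sol' := sol ++ [c]
        match solveA pLen g (row + 1) sol' (steps ++ [sol']) with
        | ⟨(some true, f', st'), hf⟩ => ⟨(some true, f', st'), le_trans hf (Nat.le_succ g)⟩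
        | ⟨(some false, f', st'), hf⟩ =>
          let r2 := tryA pLen f' row (c + 1) sol st'
          ⟨r2.1, le_trans r2.2 (le_trans hf (Nat.le_succ g))⟩
        | ⟨(none, f', st'), hf⟩ => ⟨(none, f', st'), le_trans hf (Nat.le_succ g)⟩
      else
        let r2 := tryA pLen g row (c + 1) sol steps
        ⟨r2.1, le_trans r2.2 (Nat.le_succ g)⟩
    else ⟨(some false, g, steps), Nat.le_succ g⟩
termination_by (fuel, 0, 0)
decreasing_by
  · apply Prod.Lex.left; omega
  · have hb : f' ≤ g := hf
    apply Prod.Lex.left; omega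
  · apply Prod.Lex.left; omega
end

def partial_observation_8_queens_steps (partial_state : List Int) : List (List Int) :=
  (solveA partial_state.length 1000000 (partial_state.length : Int) partial_state []).1.2.2

-- ===== PORT B =====
-- the while-loop of Source B; `stack` holds the per-depth next-column counters, top first
def loopB : Nat → List Int → List Int → List (List Int) → List (List Int)
  | 0, _, _, steps => steps
  | _ + 1, [], _, steps => steps
  | g + 1, col :: K, sol, steps =>
    if col == 8 then
      match K with
      | [] => steps
      | p :: K' => loopB g ((p + 1) :: K') sol.dropLast steps
    else if isSafe sol (sol.length : Int) col then
      let sol' := sol ++ [col]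
      if sol'.length == 8 then steps ++ [sol'] ++ [sol']
      else loopB g (0 :: col :: K) sol' (steps ++ [sol'])
    else loopB g ((col + 1) :: K) sol steps

def partial_observation_8_queens_steps_alt (partial_state : List Int) : List (List Int) :=
  if partial_state.length == 8 then [partial_state]
  else loopB 1000000 [0] partial_state []

-- ===== PRECONDITION & SPEC =====
def Spec_partial_observation_8_queens_steps (partial_state : List Int) (out : List (List Int)) : Prop := out = partial_observation_8_queens_steps_alt partial_state
instance (partial_state : List Int) (out : List (List Int)) : Decidable (Spec_partial_observation_8_queens_steps partial_state out) := by unfold Spec_partial_observation_8_queens_steps; infer_instance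

-- ===== CLAIM (what is proved, stated in full; the proofs are below) =====
def Claim_equal_partial_observation_8_queens_steps : Prop := ∀ (partial_state : List Int), Dom_partial_observation_8_queens_steps partial_state → Spec_partial_observation_8_queens_steps partial_state (partial_observation_8_queens_steps partial_state)

-- ===== LEMMAS AND PROOFS =====

-- simulation: the iterative DFS frame (c :: K) runs A's column loop from column c,
-- then (on failure) proceeds with the popped continuation K
lemma simB (fuel : Nat) :
    ∀ (pLen : Nat) (c : Int) (K : List Int) (sol : List Int) (steps : List (List Int)),
      (pLen : Int) ≤ (sol.length : Int) → 0 ≤ c → c ≤ 8 →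
      loopB fuel (c :: K) sol steps =
        (match (tryA pLen fuel (sol.length : Int) c sol steps).1 with
         | (some true, _, st') => st'
         | (none, _, st') => st'
         | (some false, f', st') => loopB (f' + 1) (8 :: K) sol st') := by
  induction fuel using Nat.strong_induction_on with
  | _ fuel IH =>
    intro pLen c K sol steps hp hc0 hc8
    match fuel with
    | 0 => simp [tryA, loopB]
    | g + 1 =>
      rw [tryA]
      by_cases hc : c < 8
      · have hcne : (c == 8) = false := by simp; omega
        by_cases hs : isSafe sol (sol.length : Int) c
        · -- safe column: place it
          simp only [if_pos hc, if_pos hs]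
          by_cases h8 : (sol.length : Int) + 1 = 8
          · -- the placement completes the board
            rw [solveA]
            simp only [if_pos (show ((sol.length : Int) + 1 == 8) = true by simpa using h8)]
            rw [loopB.eq_def]
            simp only [hcne, Bool.false_eq_true, if_false, if_pos hs,
              show (((sol ++ [c]).length : Nat) == 8) = true by simp; omega]
            simp
          · -- descend into the child frame
            rw [solveA]
            have hne : ((sol.length : Int) + 1 == 8) = false := by simpa using h8
            have hnp : ¬ ((sol.length : Int) + 1 < (pLen : Int)) := by omega
            simp only [hne, Bool.false_eq_true, if_false, if_neg hnp]
            rw [loopB.eq_def]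
            simp only [hcne, Bool.false_eq_true, if_false, if_pos hs,
              show (((sol ++ [c]).length : Nat) == 8) = false by simp; omega]
            have hlen : (((sol ++ [c]).length : Nat) : Int) = (sol.length : Int) + 1 := by simp
            rcases hsv : tryA pLen g ((sol.length : Int) + 1) 0 (sol ++ [c]) (steps ++ [sol ++ [c]])
              with ⟨⟨ob, f', st'⟩, hf⟩
            have hchild := IH g (by omega) pLen 0 (c :: K) (sol ++ [c]) (steps ++ [sol ++ [c]])
              (by simp only [List.length_append, List.length_cons, List.length_nil]; push_cast; omega)
              (by omega) (by omega)
            rw [hlen, hsv] at hchild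
            rw [hchild]
            rcases ob with _ | b
            · rfl
            · rcases b
              · -- child failed: pop and continue with the next column
                have hb : f' ≤ g := hf
                have hsib := IH f' (by omega) pLen (c + 1) K sol st' hp (by omega) (by omega)
                show loopB (f' + 1) (8 :: c :: K) (sol ++ [c]) st' = _
                rw [loopB.eq_def]
                simp only [show ((8 : Int) == 8) = true by decide, if_true, List.dropLast_concat]
                exact hsib.trans rfl
              · rfl
        · -- unsafe column: advance the counter
          simp only [if_pos hc, if_neg hs]
          rw [loopB.eq_def]
          simp only [hcne, Bool.false_eq_true, if_false, if_neg hs]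
          exact IH g (by omega) pLen (c + 1) K sol steps hp (by omega) (by omega)
      · -- c = 8: the frame is exhausted
        have hceq : c = 8 := by omega
        subst hceq
        simp only [if_neg hc]

theorem partial_observation_8_queens_steps_spec : Claim_equal_partial_observation_8_queens_steps := by
  intro ps _
  unfold Spec_partial_observation_8_queens_steps
  unfold partial_observation_8_queens_steps partial_observation_8_queens_steps_alt
  by_cases hL : ps.length = 8
  · rw [solveA]
    simp [hL]
  · rw [solveA]
    have h8 : (((ps.length : Nat) : Int) == 8) = false := by simp; omega
    have hnp : ¬ (((ps.length : Nat) : Int) < ((ps.length : Nat) : Int)) := by omega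
    simp only [h8, Bool.false_eq_true, if_false, if_neg hnp,
      show ((ps.length : Nat) == 8) = false by simp; omega]
    have hsim := simB 1000000 ps.length 0 [] ps [] (le_refl _) (by omega) (by omega)
    rw [hsim]
    rcases hsv : tryA ps.length 1000000 ((ps.length : Nat) : Int) 0 ps []
      with ⟨⟨ob, f', st'⟩, hf⟩
    match ob with
    | some true => simp
    | none => simp
    | some false =>
      show st' = loopB (f' + 1) [8] ps st'
      rw [loopB]
      simp
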